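-- pv_equiv track=rewrite | github.com/kcirred/torch-spyre | torch_spyre/_inductor/core_division.py | multi_dim_core_split
-- ===== SOURCE A (Python) =====
-- def core_split(size: int, max_cores: int) -> int:
--     """
--     Find the largest divisor of size that doesn't exceed max_cores.
--
--     Args:
--         size: The dimension size to split
--         max_cores: Maximum number of cores to use for this dimension
--
--     Returns:
--         Number of cores to use (always divides size evenly)
--     """
--     for i in range(max_cores, 0, -1):
--         if size % i == 0:
--             return i
--     return 1
--
-- def multi_dim_core_split(
--     sizes: list[int], max_cores: int, priorities: list[int] | None = None
-- ) -> list[int]: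
--     """
--     Distribute max_cores across multiple dimensions optimally.
--
--     This function tries to split cores across multiple dimensions to maximize
--     parallelism while ensuring even division. It uses a greedy approach that
--     prioritizes dimensions based on:
--     1. User-specified priorities (if provided)
--     2. Dimension size (larger dimensions get priority)
--     3. Divisibility (dimensions that divide evenly get priority)
--
--     Args:
--         sizes: List of dimension sizes that can be parallelized
--         max_cores: Total number of cores available
--         priorities: Optional list of priority values (higher = more important)
--                    If None, uses dimension sizes as priorities
--
--     Returns:
--         List of core splits for each dimension (same length as sizes)
--         The product of all splits will be <= max_cores
--
--     Example:
--         >>> multi_dim_core_split([128, 64, 32], max_cores=8)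
--         [4, 2, 1]  # 4*2*1 = 8 cores total
--
--         >>> multi_dim_core_split([100, 50], max_cores=10)
--         [5, 2]  # 5*2 = 10 cores total
--     """
--     if not sizes:
--         return []
--
--     n_dims = len(sizes)
--     splits = [1] * n_dims
--
--     # Use provided priorities or default to the sizes of dimensions
--     if priorities is None:
--         priorities = sizes.copy()
--
--     # Create list of (dimension_index, size, priority) tuples
--     dim_info = [(i, sizes[i], priorities[i]) for i in range(n_dims)]
--
--     # Sort by priority (descending), then by size (descending)
--     dim_info.sort(key=lambda x: (x[2], x[1]), reverse=True)
--
--     n_cores_to_split = max_cores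
--
--     # Greedy allocation: try to split highest priority dimensions first
--     for dim_idx, size, _ in dim_info:
--         if n_cores_to_split <= 1:
--             break
--
--         # Find the best split for this dimension given n_cores_to_split
--         best_split = core_split(size, n_cores_to_split)
--
--         if best_split > 1:
--             splits[dim_idx] = best_split
--             n_cores_to_split = n_cores_to_split // best_split
--
--     return splits
-- ===== SOURCE B (Python) =====
-- def _largest_divisor_le(size, bound):
--     """Largest i with 1 <= i <= bound and size % i == 0, via O(sqrt(|size|))
--     divisor-pair enumeration (bound >= 1 assumed by the caller)."""
--     n = abs(size)
--     if n == 0: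
--         return bound
--     best = 1
--     d = 1
--     while d * d <= n:
--         if n % d == 0:
--             if d <= bound and d > best:
--                 best = d
--             q = n // d
--             if q <= bound and q > best:
--                 best = q
--         d += 1
--     return best
--
--
-- def multi_dim_core_split(sizes, max_cores, priorities=None):
--     if not sizes:
--         return []
--     if priorities is None:
--         priorities = sizes
--     order = sorted(range(len(sizes)),
--                    key=lambda i: (priorities[i], sizes[i]), reverse=True)
--     splits = [1] * len(sizes)
--     remaining = max_cores
--     for i in order:
--         if remaining <= 1:
--             break
--         d = _largest_divisor_le(sizes[i], remaining)
--         if d > 1: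
--             splits[i] = d
--             remaining //= d
--     return splits
-- ===== Notes on version B (the rewrite author's own statement) =====
-- stated objective: alternative
-- what changed: Per dimension, A scans every candidate i from n_cores_to_split down to 1 to find the largest divisor, while B enumerates divisor pairs (d, size//d) for d up to sqrt(|size|) and keeps the largest one within the bound; B also sorts dimension indices instead of (index, size, priority) triples.
import Mathlib
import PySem

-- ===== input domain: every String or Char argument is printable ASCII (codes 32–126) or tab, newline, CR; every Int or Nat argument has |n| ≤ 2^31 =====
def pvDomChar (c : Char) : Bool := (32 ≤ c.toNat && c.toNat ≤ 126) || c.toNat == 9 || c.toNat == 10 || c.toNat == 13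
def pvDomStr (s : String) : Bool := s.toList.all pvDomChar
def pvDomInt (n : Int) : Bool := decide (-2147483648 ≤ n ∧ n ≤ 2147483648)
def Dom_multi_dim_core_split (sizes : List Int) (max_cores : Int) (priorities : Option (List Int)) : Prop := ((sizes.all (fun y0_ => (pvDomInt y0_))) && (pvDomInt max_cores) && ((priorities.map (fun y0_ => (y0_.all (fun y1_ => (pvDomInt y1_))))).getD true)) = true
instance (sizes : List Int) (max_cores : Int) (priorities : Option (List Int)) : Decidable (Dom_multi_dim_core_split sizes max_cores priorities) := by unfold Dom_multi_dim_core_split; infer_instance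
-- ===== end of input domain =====

-- B replaces A's O(max_cores) downward scan for the largest divisor by an O(sqrt(size))
-- divisor-pair enumeration and sorts indices instead of (index, size, priority) triples.

-- ===== PORT A =====
-- core_split: the early-return 'for i in range(max_cores, 0, -1)' loop is find? over that range
def core_split (size : Int) (max_cores : Int) : Int :=
  ((PySem.List.pyRange max_cores 0 (-1)).find? (fun i => PySem.Int.mod size i == 0)).getD 1

def multi_dim_core_split (sizes : List Int) (max_cores : Int) (priorities : Option (List Int)) : List Int :=
  if sizes = [] then []
  else
    let n_dims : Int := PySem.List.len sizes
    let splits : List Int := PySem.List.pyRepeat [1] n_dims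
    let ps : List Int := priorities.getD sizes
    let dim_info : List (Int × Int × Int) :=
      (PySem.List.pyRange 0 n_dims 1).map
        (fun i => (i, PySem.List.pyGetD sizes i 0, PySem.List.pyGetD ps i 0))
    let dim_sorted := PySem.List.sorted2 dim_info (fun x => x.2.2) (fun x => x.2.1) true
    -- the 'break' is ported as a skip guard: the state never changes once n_cores_to_split ≤ 1
    let res := dim_sorted.foldl
      (fun st t =>
        if st.2 ≤ 1 then st
        else
          let best_split := core_split t.2.1 st.2
          if best_split > 1 then
            (PySem.List.pySetD st.1 t.1 best_split, PySem.Int.floordiv st.2 best_split)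
          else st)
      (splits, max_cores)
    res.1

-- ===== PORT B =====
-- 'while d * d <= n' loop of Source B's _largest_divisor_le, recursion on d;
-- the Nat fuel only makes the recursion structural: n.toNat + 1 steps always suffice
def divLoop (fuel : Nat) (n bound d best : Int) : Int :=
  match fuel with
  | 0 => best
  | fuel + 1 =>
    if d * d ≤ n then
      let best1 :=
        if PySem.Int.mod n d = 0 then
          let b1 := if d ≤ bound ∧ best < d then d else best
          let q := PySem.Int.floordiv n d
          if q ≤ bound ∧ b1 < q then q else b1
        else best
      divLoop fuel n bound (d + 1) best1
    else best

def largestDivisorLe (size : Int) (bound : Int) : Int :=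
  let n := |size|
  if n = 0 then bound
  else divLoop (n.toNat + 1) n bound 1 1

def multi_dim_core_split_alt (sizes : List Int) (max_cores : Int) (priorities : Option (List Int)) : List Int :=
  if sizes = [] then []
  else
    let ps : List Int := priorities.getD sizes
    let order := PySem.List.sorted2 (PySem.List.pyRange 0 (PySem.List.len sizes) 1)
        (fun i => PySem.List.pyGetD ps i 0) (fun i => PySem.List.pyGetD sizes i 0) true
    let res := order.foldl
      (fun st i =>
        if st.2 ≤ 1 then st
        else
          let d := largestDivisorLe (PySem.List.pyGetD sizes i 0) st.2
          if d > 1 then (PySem.List.pySetD st.1 i d, PySem.Int.floordiv st.2 d)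
          else st)
      (PySem.List.pyRepeat [1] (PySem.List.len sizes), max_cores)
    res.1

-- ===== PRECONDITION & SPEC =====
-- Pre_ excludes only the inputs where A raises IndexError: a provided priorities list
-- shorter than sizes (priorities[i] is read for every dimension index).
def Pre_multi_dim_core_split (sizes : List Int) (max_cores : Int) (priorities : Option (List Int)) : Prop :=
  (priorities.map (fun ps => decide (sizes.length ≤ ps.length))).getD true = true
instance (sizes : List Int) (max_cores : Int) (priorities : Option (List Int)) : Decidable (Pre_multi_dim_core_split sizes max_cores priorities) := by unfold Pre_multi_dim_core_split; infer_instance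

def pvWitness_multi_dim_core_split : List Int × Int × Option (List Int) := ([12, 10, 7], 8, some [1, 3, 2])

def Spec_multi_dim_core_split (sizes : List Int) (max_cores : Int) (priorities : Option (List Int)) (out : List Int) : Prop := out = multi_dim_core_split_alt sizes max_cores priorities
instance (sizes : List Int) (max_cores : Int) (priorities : Option (List Int)) (out : List Int) : Decidable (Spec_multi_dim_core_split sizes max_cores priorities out) := by unfold Spec_multi_dim_core_split; infer_instance

-- ===== CLAIM (what is proved, stated in full; the proofs are below) =====
def Claim_equal_multi_dim_core_split : Prop := ∀ (sizes : List Int) (max_cores : Int) (priorities : Option (List Int)), Dom_multi_dim_core_split sizes max_cores priorities → Pre_multi_dim_core_split sizes max_cores priorities → Spec_multi_dim_core_split sizes max_cores priorities (multi_dim_core_split sizes max_cores priorities)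

-- ===== LEMMAS AND PROOFS =====

-- r is the largest i with 1 ≤ i ≤ bound dividing size ('size % i == 0' in both Pythons)
def goodDiv (size bound j : Int) : Prop := 1 ≤ j ∧ j ≤ bound ∧ j ∣ size
def isBest (size bound r : Int) : Prop := goodDiv size bound r ∧ ∀ j, goodDiv size bound j → j ≤ r

lemma isBest_unique {size bound r r' : Int} (h : isBest size bound r) (h' : isBest size bound r') : r = r' :=
  le_antisymm (h'.2 r h.1) (h.2 r' h'.1)

lemma core_split_isBest (size : Int) : ∀ bound : Int, 1 ≤ bound → isBest size bound (core_split size bound) := by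
  intro bound hb
  induction bound, hb using Int.le_induction with
  | base =>
      have h1 : PySem.List.pyRange 1 0 (-1) = [1] := by decide
      have hm : (PySem.Int.mod size 1 == 0) = true := by
        simp

      unfold core_split
      rw [h1]
      simp only [List.find?, hm, Option.getD_some]
      exact ⟨⟨le_refl 1, le_refl 1, one_dvd _⟩, fun j hj => hj.2.1⟩
  | succ n hn ih =>
      have hcons : PySem.List.pyRange (n + 1) 0 (-1) = (n + 1) :: PySem.List.pyRange n 0 (-1) := by
        rw [PySem.List.pyRange_neg_one_cons (a := n + 1) (b := 0) (by omega)]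
        norm_num
      unfold core_split
      rw [hcons]
      by_cases hd : (n + 1) ∣ size
      · have hm : (PySem.Int.mod size (n + 1) == 0) = true := by
          simp [PySem.Int.mod_eq_zero_iff_dvd, hd]
        rw [List.find?_cons_of_pos (p := fun i => PySem.Int.mod size i == 0) hm, Option.getD_some]
        exact ⟨⟨by omega, le_refl _, hd⟩, fun j hj => hj.2.1⟩
      · have hm : ¬ ((PySem.Int.mod size (n + 1) == 0) = true) := by
          simp [PySem.Int.mod_eq_zero_iff_dvd, hd]
        rw [List.find?_cons_of_neg (p := fun i => PySem.Int.mod size i == 0) hm]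
        have hrec := ih
        unfold core_split at hrec
        refine ⟨⟨hrec.1.1, le_trans hrec.1.2.1 (by omega), hrec.1.2.2⟩, fun j hj => ?_⟩
        obtain ⟨hj1, hj2, hj3⟩ := hj
        by_cases hj' : j = n + 1
        · exact absurd (hj' ▸ hj3) hd
        · exact hrec.2 j ⟨hj1, by omega, hj3⟩

def bestUpdate (n bound d best : Int) : Int :=
  if PySem.Int.mod n d = 0 then
    if PySem.Int.floordiv n d ≤ bound ∧ (if d ≤ bound ∧ best < d then d else best) < PySem.Int.floordiv n d
    then PySem.Int.floordiv n d
    else if d ≤ bound ∧ best < d then d else best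
  else best

lemma divLoop_eq_step (f : Nat) (n bound d best : Int) (h : d * d ≤ n) :
    divLoop (f + 1) n bound d best = divLoop f n bound (d + 1) (bestUpdate n bound d best) := by
  rw [divLoop, if_pos h]
  rfl

lemma one_le_floordiv {n k : Int} (hk : 0 < k) (hkn : k ≤ n) : 1 ≤ PySem.Int.floordiv n k := by
  have h1 := PySem.Int.floordiv_mul_add_mod n k
  have h2 := PySem.Int.mod_nonneg n hk
  have h3 := PySem.Int.mod_lt n hk
  nlinarith

lemma floordiv_mul_of_dvd {n k : Int} (hkd : k ∣ n) : PySem.Int.floordiv n k * k = n := by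
  have h0 : PySem.Int.mod n k = 0 := (PySem.Int.mod_eq_zero_iff_dvd n k).2 hkd
  have h1 := PySem.Int.floordiv_mul_add_mod n k
  rw [h0] at h1
  linarith

lemma divLoop_isBest (n bound : Int) (hn : 1 ≤ n) :
    ∀ (fuel : Nat) (d best : Int), (n + 1 - d).toNat ≤ fuel → 1 ≤ d →
      goodDiv n bound best →
      (∀ k, goodDiv n bound k → min k (PySem.Int.floordiv n k) < d → k ≤ best) →
      isBest n bound (divLoop fuel n bound d best) := by
  intro fuel
  induction fuel with
  | zero =>
      intro d best hfuel hd hgood hcov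
      have hterm : n + 1 ≤ d := by omega
      show isBest n bound best
      refine ⟨hgood, fun k hk => hcov k hk ?_⟩
      have hkn : k ≤ n := Int.le_of_dvd (by omega) hk.2.2
      calc min k (PySem.Int.floordiv n k) ≤ k := min_le_left _ _
        _ < d := by omega
  | succ f ih =>
      intro d best hfuel hd hgood hcov
      by_cases hdd : d * d ≤ n
      · have hdn : d ≤ n := by nlinarith
        rw [divLoop_eq_step f n bound d best hdd]
        apply ih
        · omega
        · omega
        · -- the updated best is still a divisor of n in [1, bound]
          obtain ⟨hb1, hb2, hb3⟩ := hgood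
          unfold bestUpdate
          by_cases hmod : PySem.Int.mod n d = 0
          · have hddvd : d ∣ n := (PySem.Int.mod_eq_zero_iff_dvd n d).1 hmod
            have hq1 : 1 ≤ PySem.Int.floordiv n d := one_le_floordiv (by omega) hdn
            have hqd : PySem.Int.floordiv n d ∣ n :=
              ⟨d, (floordiv_mul_of_dvd hddvd).symm⟩
            rw [if_pos hmod]
            by_cases h2 : d ≤ bound ∧ best < d
            · simp only [if_pos h2]
              split_ifs with h1
              · exact ⟨hq1, h1.1, hqd⟩
              · exact ⟨by omega, h2.1, hddvd⟩
            · simp only [if_neg h2]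
              split_ifs with h1
              · exact ⟨hq1, h1.1, hqd⟩
              · exact ⟨hb1, hb2, hb3⟩
          · rw [if_neg hmod]
            exact ⟨hb1, hb2, hb3⟩
        · -- every divisor whose smaller cofactor is below d + 1 is ≤ the updated best
          intro k hk hmin
          obtain ⟨hk1, hkb, hkd⟩ := hk
          have hkn : k ≤ n := Int.le_of_dvd (by omega) hkd
          have hfk1 : 1 ≤ PySem.Int.floordiv n k := one_le_floordiv (by omega) hkn
          have hmulk : PySem.Int.floordiv n k * k = n := floordiv_mul_of_dvd hkd
          have hup : best ≤ bestUpdate n bound d best := by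
            unfold bestUpdate
            split_ifs <;> omega
          by_cases hlt : min k (PySem.Int.floordiv n k) < d
          · exact le_trans (hcov k ⟨hk1, hkb, hkd⟩ hlt) hup
          · rcases min_cases k (PySem.Int.floordiv n k) with ⟨hmk, hle2⟩ | ⟨hmk, hlt2⟩
            · -- the step d is k itself
              have hkdd : k = d := by omega
              have hmod : PySem.Int.mod n d = 0 :=
                (PySem.Int.mod_eq_zero_iff_dvd n d).2 (hkdd ▸ hkd)
              unfold bestUpdate
              rw [if_pos hmod]
              split_ifs <;> omega
            · -- the step d is the cofactor n // k, so n // d = k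
              have hfd : PySem.Int.floordiv n k = d := by omega
              have hnkd : n = k * d := by rw [← hfd]; linarith [hmulk]
              have hmod : PySem.Int.mod n d = 0 :=
                (PySem.Int.mod_eq_zero_iff_dvd n d).2 ⟨k, by linarith [mul_comm k d]⟩
              have hqk : PySem.Int.floordiv n d = k := by
                have h1 := floordiv_mul_of_dvd (n := n) (k := d) ⟨k, by linarith [mul_comm k d]⟩
                have h2 : PySem.Int.floordiv n d * d = k * d := by linarith
                exact mul_right_cancel₀ (by omega) h2
              unfold bestUpdate
              rw [if_pos hmod, hqk]
              split_ifs <;> omega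
      · rw [divLoop, if_neg hdd]
        refine ⟨hgood, fun k hk => hcov k hk ?_⟩
        obtain ⟨hk1, hkb, hkd⟩ := hk
        have hkn : k ≤ n := Int.le_of_dvd (by omega) hkd
        have hfk1 : 1 ≤ PySem.Int.floordiv n k := one_le_floordiv (by omega) hkn
        have hmulk : PySem.Int.floordiv n k * k = n := floordiv_mul_of_dvd hkd
        have hm1 : 1 ≤ min k (PySem.Int.floordiv n k) := le_min hk1 hfk1
        have hmm2 : min k (PySem.Int.floordiv n k) * min k (PySem.Int.floordiv n k) ≤ n := by
          have h1 := min_le_left k (PySem.Int.floordiv n k)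
          have h2 := min_le_right k (PySem.Int.floordiv n k)
          nlinarith
        nlinarith [hmm2, hm1, hd]

lemma largestDivisorLe_isBest (size bound : Int) (hb : 1 ≤ bound) :
    isBest size bound (largestDivisorLe size bound) := by
  unfold largestDivisorLe
  by_cases h0 : |size| = 0
  · have hz : size = 0 := abs_eq_zero.1 h0
    simp only [h0, if_true]
    exact ⟨⟨hb, le_refl _, hz ▸ dvd_zero bound⟩, fun j hj => hj.2.1⟩
  · have hn : 1 ≤ |size| := by have := abs_nonneg size; omega
    simp only [if_neg h0]
    have hcov : ∀ k, goodDiv |size| bound k → min k (PySem.Int.floordiv |size| k) < 1 → k ≤ 1 := by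
      intro k hk hlt
      exfalso
      obtain ⟨hk1, _, hkd⟩ := hk
      have hkn : k ≤ |size| := Int.le_of_dvd (by omega) hkd
      have hfk1 : 1 ≤ PySem.Int.floordiv |size| k := by
        rw [PySem.Int.le_floordiv_iff_mul_le (by omega)]; omega
      have := le_min hk1 hfk1
      omega
    have hbest := divLoop_isBest |size| bound hn (|size|.toNat + 1) 1 1 (by omega) (le_refl 1)
      ⟨le_refl 1, hb, one_dvd _⟩ hcov
    refine ⟨⟨hbest.1.1, hbest.1.2.1, (dvd_abs _ _).1 hbest.1.2.2⟩, fun j hj => ?_⟩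
    exact hbest.2 j ⟨hj.1, hj.2.1, (dvd_abs _ _).2 hj.2.2⟩

lemma core_split_eq_largestDivisorLe (size bound : Int) (hb : 1 ≤ bound) :
    core_split size bound = largestDivisorLe size bound :=
  isBest_unique (core_split_isBest size bound hb) (largestDivisorLe_isBest size bound hb)

lemma insertBy_map {α β : Type} (f : α → β) (p : β → β → Bool) (x : α) (ys : List α) :
    PySem.List.insertBy p (f x) (ys.map f) =
      (PySem.List.insertBy (fun a b => p (f a) (f b)) x ys).map f := by
  induction ys with
  | nil => rfl
  | cons y ys ih =>
      simp only [List.map_cons, PySem.List.insertBy]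
      by_cases h : p (f x) (f y) <;> simp [h, ih]

lemma foldl_insertBy_map {α β : Type} (f : α → β) (p : β → β → Bool) (xs acc : List α) :
    (xs.map f).foldl (fun acc x => PySem.List.insertBy p x acc) (acc.map f) =
      (xs.foldl (fun acc x => PySem.List.insertBy (fun a b => p (f a) (f b)) x acc) acc).map f := by
  induction xs generalizing acc with
  | nil => rfl
  | cons x xs ih =>
      simpa [insertBy_map] using ih (PySem.List.insertBy (fun a b => p (f a) (f b)) x acc)

lemma sorted2_map {α β : Type} (f : α → β) (k1 k2 : β → Int) (xs : List α) (rev : Bool) :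
    PySem.List.sorted2 (xs.map f) k1 k2 rev =
      (PySem.List.sorted2 xs (fun a => k1 (f a)) (fun a => k2 (f a)) rev).map f := by
  cases rev
  · exact foldl_insertBy_map f
      (fun a b => decide (k1 a < k1 b) || (!decide (k1 b < k1 a) && decide (k2 a < k2 b))) xs []
  · exact foldl_insertBy_map f
      (fun a b => decide (k1 b < k1 a) || (!decide (k1 a < k1 b) && decide (k2 b < k2 a))) xs []

-- ===== VERDICT (by name: the statement is the Claim_ definition above) =====
theorem multi_dim_core_split_spec : Claim_equal_multi_dim_core_split := by
  intro sizes max_cores priorities hdom hpre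
  unfold Spec_multi_dim_core_split
  by_cases hsz : sizes = []
  · simp [multi_dim_core_split, multi_dim_core_split_alt, hsz]
  · simp only [multi_dim_core_split, multi_dim_core_split_alt, if_neg hsz]
    rw [sorted2_map (fun i => (i, PySem.List.pyGetD sizes i 0, PySem.List.pyGetD (priorities.getD sizes) i 0))
          (fun x => x.2.2) (fun x => x.2.1) (PySem.List.pyRange 0 (PySem.List.len sizes) 1) true]
    rw [List.foldl_map]
    refine congrArg Prod.fst (PySem.List.foldl_congr_mem _ _ _ _ ?_)
    intro st i _
    by_cases hle : st.2 ≤ 1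
    · simp [hle]
    · have hcs : core_split (PySem.List.pyGetD sizes i 0) st.2 =
          largestDivisorLe (PySem.List.pyGetD sizes i 0) st.2 :=
        core_split_eq_largestDivisorLe _ _ (by omega)
      simp [hle, hcs]
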